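-- pv_equiv track=rewrite | github.com/Plugar-Viorel/MPI_SAT_PROJECT | main.py | pick_var_moms
-- ===== SOURCE A (Python) =====
-- def pick_var_moms(cnf, assign):
--     """MOMS: maximizează aparițiile în clauzele de dimensiune minimă"""
--     min_size = min(len(cl) for cl in cnf if any(abs(l) not in assign for l in cl))
--     counts = {}
--     for cl in cnf:
--         if len(cl) == min_size:
--             for l in cl:
--                 v = abs(l)
--                 if v not in assign:
--                     counts[v] = counts.get(v, 0) + 1
--     return max(counts, key=counts.get)
-- ===== SOURCE B (Python) =====
-- def pick_var_moms(cnf, assign):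
--     """MOMS via a single indexing pass: group unassigned-variable occurrence counts
--     by clause length, then read off the counter at the smallest length present."""
--     by_len = {}
--     for cl in cnf:
--         for l in cl:
--             v = abs(l)
--             if v not in assign:
--                 counts = by_len.setdefault(len(cl), {})
--                 counts[v] = counts.get(v, 0) + 1
--     counts = by_len[min(by_len)]
--     return max(counts, key=counts.get)
-- ===== Notes on version B (the rewrite author's own statement) =====
-- stated objective: alternative
-- what changed: A computes the minimum clause size with min() over a filtered scan and then rescans cnf counting variables of min-size clauses (two passes); B makes a single pass building a clause-length -> per-variable counter index, then looks up the counter at the smallest indexed length. Pre_ excludes inputs where no clause has an unassigned literal, on which A's min() over an empty generator raises ValueError (B's min() over the empty index raises the same).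
import Mathlib
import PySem

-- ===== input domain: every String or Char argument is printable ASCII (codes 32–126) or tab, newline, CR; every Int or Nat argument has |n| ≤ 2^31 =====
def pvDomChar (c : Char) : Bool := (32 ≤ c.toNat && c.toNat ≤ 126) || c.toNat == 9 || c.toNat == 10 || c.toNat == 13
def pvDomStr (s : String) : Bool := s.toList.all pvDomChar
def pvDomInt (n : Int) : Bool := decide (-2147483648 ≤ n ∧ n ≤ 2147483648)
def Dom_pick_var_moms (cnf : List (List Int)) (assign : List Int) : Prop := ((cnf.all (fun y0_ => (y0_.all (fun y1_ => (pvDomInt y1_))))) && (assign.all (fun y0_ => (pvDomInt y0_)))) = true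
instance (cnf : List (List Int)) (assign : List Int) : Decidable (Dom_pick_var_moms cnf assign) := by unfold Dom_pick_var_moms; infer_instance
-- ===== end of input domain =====

-- B's change: A finds the minimum clause size with a filtered scan and then rescans cnf counting
-- variables of min-size clauses (two passes); B makes one pass building a clause-length ->
-- per-variable counter index and reads off the counter at the smallest indexed length
-- (objective: alternative decomposition, same cost).

-- ===== PORT A =====
-- 'abs(l) not in assign' (shared test of both Pythons)
def pvUnassigned (assign : List Int) (l : Int) : Bool := !(assign.contains |l|)

-- inner counting loop of A: 'for l in cl: v=abs(l); if v not in assign: counts[v]=counts.get(v,0)+1'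
def pvCount (assign : List Int) (cl : List Int) (c : PySem.Dict Int Int) : PySem.Dict Int Int :=
  cl.foldl (fun c l => if pvUnassigned assign l then c.insert |l| (c.getD |l| 0 + 1) else c) c

def pick_var_moms (cnf : List (List Int)) (assign : List Int) : Int :=
  -- min(len(cl) for cl in cnf if any(abs(l) not in assign for l in cl)); none = ValueError, excluded by Pre_
  match PySem.List.min? ((cnf.filter (fun cl => cl.any (pvUnassigned assign))).map (fun cl => (cl.length : Int))) (fun x => x) with
  | none => 0
  | some min_size =>
    let counts := cnf.foldl (fun c cl => if (cl.length : Int) = min_size then pvCount assign cl c else c) PySem.Dict.empty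
    -- max(counts, key=counts.get): counts.get is exact as getD _ 0 since max only queries present keys
    (PySem.List.max? counts.keys (fun k => counts.getD k 0)).getD 0

-- ===== PORT B =====
-- one literal of B's inner loop; n = len(cl). Python's setdefault aliases the sub-dict and
-- mutates it in place; the port re-inserts it at key n, which is value- and order-exact
-- (insert overwrites in place, new keys append — exactly setdefault's behaviour).
def pvBStep (assign : List Int) (n : Int)
    (t : PySem.Dict Int (PySem.Dict Int Int)) (l : Int) : PySem.Dict Int (PySem.Dict Int Int) :=
  if pvUnassigned assign l then
    let sub := t.getD n PySem.Dict.empty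
    t.insert n (sub.insert |l| (sub.getD |l| 0 + 1))
  else t

def pick_var_moms_alt (cnf : List (List Int)) (assign : List Int) : Int :=
  let by_len := cnf.foldl (fun t cl => cl.foldl (pvBStep assign (cl.length : Int)) t) PySem.Dict.empty
  -- min(by_len) iterates the keys; none = ValueError, excluded by Pre_
  match PySem.List.min? by_len.keys (fun x => x) with
  | none => 0
  | some min_size =>
    let counts := by_len.getD min_size PySem.Dict.empty
    (PySem.List.max? counts.keys (fun k => counts.getD k 0)).getD 0

-- ===== PRECONDITION & SPEC =====
-- Pre_ excludes exactly the inputs where no clause has an unassigned literal: there Python A's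
-- min() over an empty generator raises ValueError (B's min() over the empty index raises too).
def Pre_pick_var_moms (cnf : List (List Int)) (assign : List Int) : Prop :=
  (cnf.any (fun cl => cl.any (fun l => !(assign.contains |l|)))) = true
instance (cnf : List (List Int)) (assign : List Int) : Decidable (Pre_pick_var_moms cnf assign) := by
  unfold Pre_pick_var_moms; infer_instance

def pvWitness_pick_var_moms : List (List Int) × List Int := ([[1, -2], [3]], [2])

def Spec_pick_var_moms (cnf : List (List Int)) (assign : List Int) (out : Int) : Prop := out = pick_var_moms_alt cnf assign
instance (cnf : List (List Int)) (assign : List Int) (out : Int) : Decidable (Spec_pick_var_moms cnf assign out) := by unfold Spec_pick_var_moms; infer_instance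

-- ===== CLAIM (what is proved, stated in full; the proofs are below) =====
def Claim_equal_pick_var_moms : Prop := ∀ (cnf : List (List Int)) (assign : List Int), Dom_pick_var_moms cnf assign → Pre_pick_var_moms cnf assign → Spec_pick_var_moms cnf assign (pick_var_moms cnf assign)

-- ===== LEMMAS AND PROOFS =====

-- inner loop of B: the table entry at key s
theorem pvBInner_getD (assign : List Int) (n : Int) (cl : List Int)
    (t : PySem.Dict Int (PySem.Dict Int Int)) (s : Int) :
    (cl.foldl (pvBStep assign n) t).getD s PySem.Dict.empty
      = if s = n then pvCount assign cl (t.getD n PySem.Dict.empty)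
        else t.getD s PySem.Dict.empty := by
  induction cl generalizing t with
  | nil => by_cases hs : s = n <;> simp [pvCount, hs]
  | cons l cl ih =>
    simp only [List.foldl_cons]
    by_cases h : pvUnassigned assign l = true
    · simp only [pvBStep, h, if_pos]
      rw [ih]
      simp only [pvCount, List.foldl_cons, h, if_pos]
      by_cases hs : s = n <;> simp [PySem.Dict.getD_insert, hs]
    · simp only [Bool.not_eq_true] at h
      simp only [pvBStep, h, Bool.false_eq_true, ite_false]
      rw [ih]
      simp [pvCount, h]

-- inner loop of B: key membership
theorem pvBInner_mem_keys (assign : List Int) (n : Int) (cl : List Int)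
    (t : PySem.Dict Int (PySem.Dict Int Int)) (s : Int) :
    s ∈ (cl.foldl (pvBStep assign n) t).keys
      ↔ (s = n ∧ cl.any (pvUnassigned assign) = true) ∨ s ∈ t.keys := by
  induction cl generalizing t with
  | nil => simp
  | cons l cl ih =>
    simp only [List.foldl_cons, List.any_cons]
    by_cases h : pvUnassigned assign l = true
    · simp only [pvBStep, h, if_pos]
      rw [ih]
      simp [PySem.Dict.mem_keys_insert]
      tauto
    · simp only [Bool.not_eq_true] at h
      simp only [pvBStep, h, Bool.false_eq_true, ite_false]
      rw [ih]
      simp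

-- outer loop of B: the table entry at key s is A's counting fold restricted to clauses of length s
theorem pvBFold_getD (assign : List Int) (cnf : List (List Int))
    (t : PySem.Dict Int (PySem.Dict Int Int)) (s : Int) :
    (cnf.foldl (fun t cl => cl.foldl (pvBStep assign (cl.length : Int)) t) t).getD s PySem.Dict.empty
      = cnf.foldl (fun c cl => if (cl.length : Int) = s then pvCount assign cl c else c)
          (t.getD s PySem.Dict.empty) := by
  induction cnf generalizing t with
  | nil => rfl
  | cons cl cnf ih =>
    simp only [List.foldl_cons]
    rw [ih, pvBInner_getD]
    by_cases hs : s = (cl.length : Int)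
    · subst hs; simp
    · have : ¬ ((cl.length : Int) = s) := fun hh => hs hh.symm
      simp [hs, this]

-- outer loop of B: the index's keys are exactly the lengths of clauses with an unassigned literal
theorem pvBFold_mem_keys (assign : List Int) (cnf : List (List Int))
    (t : PySem.Dict Int (PySem.Dict Int Int)) (s : Int) :
    s ∈ (cnf.foldl (fun t cl => cl.foldl (pvBStep assign (cl.length : Int)) t) t).keys
      ↔ s ∈ ((cnf.filter (fun cl => cl.any (pvUnassigned assign))).map (fun cl => (cl.length : Int)))
        ∨ s ∈ t.keys := by
  induction cnf generalizing t with
  | nil => simp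
  | cons cl cnf ih =>
    simp only [List.foldl_cons, List.filter_cons]
    by_cases h : cl.any (pvUnassigned assign) = true
    · rw [ih]
      rw [pvBInner_mem_keys]
      simp [h]
      constructor
      · rintro (h1 | h1 | h1)
        · exact Or.inl (Or.inr h1)
        · exact Or.inl (Or.inl h1)
        · exact Or.inr h1
      · rintro ((h1 | h1) | h1)
        · exact Or.inr (Or.inl h1)
        · exact Or.inl h1
        · exact Or.inr (Or.inr h1)
    · simp only [Bool.not_eq_true] at h
      rw [ih, pvBInner_mem_keys]
      simp [h]

-- min with identity key only depends on the set of elements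
theorem pvMin?_congr_mem (xs ys : List Int) (h : ∀ a : Int, a ∈ xs ↔ a ∈ ys) :
    PySem.List.min? xs (fun x => x) = PySem.List.min? ys (fun x => x) := by
  cases hx : PySem.List.min? xs (fun x => x) with
  | none =>
    rw [PySem.List.min?_eq_none_iff] at hx
    subst hx
    cases hy : PySem.List.min? ys (fun x => x) with
    | none => rfl
    | some m =>
      have hm := PySem.List.min?_mem hy
      rw [← h] at hm
      simp at hm
  | some m =>
    cases hy : PySem.List.min? ys (fun x => x) with
    | none =>
      rw [PySem.List.min?_eq_none_iff] at hy
      subst hy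
      have hm := PySem.List.min?_mem hx
      rw [h] at hm
      simp at hm
    | some m' =>
      have hm : m ∈ ys := (h m).mp (PySem.List.min?_mem hx)
      have hm' : m' ∈ xs := (h m').mpr (PySem.List.min?_mem hy)
      have h1 := PySem.List.min?_isMin hx m' hm'
      have h2 := PySem.List.min?_isMin hy m hm
      have hle : m ≤ m' := h1
      have hge : m' ≤ m := h2
      rw [le_antisymm hle hge]

-- ===== VERDICT (by name: the statement is the Claim_ definition above) =====
theorem pick_var_moms_spec : Claim_equal_pick_var_moms := by
  intro cnf assign _hdom _hpre
  unfold Spec_pick_var_moms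
  unfold pick_var_moms pick_var_moms_alt
  have hkeys := pvMin?_congr_mem
    ((cnf.foldl (fun t cl => cl.foldl (pvBStep assign (cl.length : Int)) t) PySem.Dict.empty).keys)
    ((cnf.filter (fun cl => cl.any (pvUnassigned assign))).map (fun cl => (cl.length : Int)))
    (by intro a; rw [pvBFold_mem_keys]; simp)
  rw [← hkeys]
  simp only [pvBFold_getD, PySem.Dict.getD_empty]
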